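-- pv_equiv track=rewrite | github.com/MarkMichiels/livemathtex | src/livemathtex/engine/evaluator.py | _normalize_symbol_name
-- ===== SOURCE A (Python) =====
-- GREEK_LETTERS = {
--     '\\alpha': 'alpha', '\\beta': 'beta', '\\gamma': 'gamma', '\\delta': 'delta',
--     '\\epsilon': 'epsilon', '\\zeta': 'zeta', '\\eta': 'eta', '\\theta': 'theta',
--     '\\iota': 'iota', '\\kappa': 'kappa', '\\lambda': 'lambda', '\\mu': 'mu',
--     '\\nu': 'nu', '\\xi': 'xi', '\\pi': 'pi', '\\rho': 'rho', '\\sigma': 'sigma',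
--     '\\tau': 'tau', '\\upsilon': 'upsilon', '\\phi': 'phi', '\\chi': 'chi',
--     '\\psi': 'psi', '\\omega': 'omega',
--     '\\Alpha': 'Alpha', '\\Beta': 'Beta', '\\Gamma': 'Gamma', '\\Delta': 'Delta',
--     '\\Epsilon': 'Epsilon', '\\Zeta': 'Zeta', '\\Eta': 'Eta', '\\Theta': 'Theta',
--     '\\Iota': 'Iota', '\\Kappa': 'Kappa', '\\Lambda': 'Lambda', '\\Mu': 'Mu',
--     '\\Nu': 'Nu', '\\Xi': 'Xi', '\\Pi': 'Pi', '\\Rho': 'Rho', '\\Sigma': 'Sigma',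
--     '\\Tau': 'Tau', '\\Upsilon': 'Upsilon', '\\Phi': 'Phi', '\\Chi': 'Chi',
--     '\\Psi': 'Psi', '\\Omega': 'Omega',
-- }
--
-- def _normalize_symbol_name(name: str) -> str:
--     """
--     Normalize a LaTeX symbol name to internal dict key.
--
--     Simple normalization for symbol table keys:
--     - Strip whitespace
--     - Replace Greek LaTeX commands with names
--     - Replace commas and braces for consistency
--
--     Examples:
--         "\\Delta_h"   -> "Delta_h"
--         "T_{h,in}"    -> "T_h_in"
--         "P_{LED,out}" -> "P_LED_out"
--     """
--     if not name:
--         return name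
--
--     result = name.strip()
--
--     # Replace Greek letter commands with names
--     for latex_cmd, greek_name in GREEK_LETTERS.items():
--         result = result.replace(latex_cmd, greek_name)
--
--     # Normalize subscript content
--     result = result.replace(',', '_')
--     result = result.replace('{', '')
--     result = result.replace('}', '')
--
--     # Remove remaining backslashes
--     result = result.replace('\\', '')
--
--     # Clean up multiple underscores
--     while '__' in result:
--         result = result.replace('__', '_')
--
--     return result
-- ===== SOURCE B (Python) =====
-- def _normalize_symbol_name(name: str) -> str:
--     if not name:
--         return name
--     out = []
--     for ch in name.strip():
--         if ch in '{}\\':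
--             continue
--         if ch == ',':
--             ch = '_'
--         if ch == '_' and out and out[-1] == '_':
--             continue
--         out.append(ch)
--     return ''.join(out)
-- ===== Notes on version B (the rewrite author's own statement) =====
-- stated objective: simpler
-- what changed: A runs ~50 whole-string .replace passes (46 Greek commands, comma, braces, backslash) plus a repeated '__'-collapsing loop; B is a single left-to-right scan that drops '{', '}' and '\', maps ',' to '_' and suppresses a repeated underscore on the fly (correct because every Greek replacement equals its command minus the backslash, which A's later backslash-removal pass performs anyway).
import Mathlib
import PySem

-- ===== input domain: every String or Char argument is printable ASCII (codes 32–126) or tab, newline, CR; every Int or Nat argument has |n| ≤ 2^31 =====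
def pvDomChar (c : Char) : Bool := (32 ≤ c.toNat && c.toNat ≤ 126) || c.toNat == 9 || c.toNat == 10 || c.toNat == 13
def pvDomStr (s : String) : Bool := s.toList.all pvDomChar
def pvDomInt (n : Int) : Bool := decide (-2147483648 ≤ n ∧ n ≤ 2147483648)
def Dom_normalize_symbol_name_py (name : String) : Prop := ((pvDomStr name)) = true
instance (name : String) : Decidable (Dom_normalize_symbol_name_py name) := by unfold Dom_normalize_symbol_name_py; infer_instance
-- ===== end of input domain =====

-- B replaces A's ~50 whole-string .replace passes by one left-to-right scan that drops
-- braces/backslashes, maps ',' to '_' and suppresses a repeated '_' on the fly (objective: simpler).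

-- ===== PORT A =====
-- GREEK_LETTERS.items() in insertion order (keys and values as char lists)
def pvGreek : List (List Char × List Char) := [
  (['\\', 'a', 'l', 'p', 'h', 'a'], ['a', 'l', 'p', 'h', 'a']),
  (['\\', 'b', 'e', 't', 'a'], ['b', 'e', 't', 'a']),
  (['\\', 'g', 'a', 'm', 'm', 'a'], ['g', 'a', 'm', 'm', 'a']),
  (['\\', 'd', 'e', 'l', 't', 'a'], ['d', 'e', 'l', 't', 'a']),
  (['\\', 'e', 'p', 's', 'i', 'l', 'o', 'n'], ['e', 'p', 's', 'i', 'l', 'o', 'n']),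
  (['\\', 'z', 'e', 't', 'a'], ['z', 'e', 't', 'a']),
  (['\\', 'e', 't', 'a'], ['e', 't', 'a']),
  (['\\', 't', 'h', 'e', 't', 'a'], ['t', 'h', 'e', 't', 'a']),
  (['\\', 'i', 'o', 't', 'a'], ['i', 'o', 't', 'a']),
  (['\\', 'k', 'a', 'p', 'p', 'a'], ['k', 'a', 'p', 'p', 'a']),
  (['\\', 'l', 'a', 'm', 'b', 'd', 'a'], ['l', 'a', 'm', 'b', 'd', 'a']),
  (['\\', 'm', 'u'], ['m', 'u']),
  (['\\', 'n', 'u'], ['n', 'u']),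
  (['\\', 'x', 'i'], ['x', 'i']),
  (['\\', 'p', 'i'], ['p', 'i']),
  (['\\', 'r', 'h', 'o'], ['r', 'h', 'o']),
  (['\\', 's', 'i', 'g', 'm', 'a'], ['s', 'i', 'g', 'm', 'a']),
  (['\\', 't', 'a', 'u'], ['t', 'a', 'u']),
  (['\\', 'u', 'p', 's', 'i', 'l', 'o', 'n'], ['u', 'p', 's', 'i', 'l', 'o', 'n']),
  (['\\', 'p', 'h', 'i'], ['p', 'h', 'i']),
  (['\\', 'c', 'h', 'i'], ['c', 'h', 'i']),
  (['\\', 'p', 's', 'i'], ['p', 's', 'i']),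
  (['\\', 'o', 'm', 'e', 'g', 'a'], ['o', 'm', 'e', 'g', 'a']),
  (['\\', 'A', 'l', 'p', 'h', 'a'], ['A', 'l', 'p', 'h', 'a']),
  (['\\', 'B', 'e', 't', 'a'], ['B', 'e', 't', 'a']),
  (['\\', 'G', 'a', 'm', 'm', 'a'], ['G', 'a', 'm', 'm', 'a']),
  (['\\', 'D', 'e', 'l', 't', 'a'], ['D', 'e', 'l', 't', 'a']),
  (['\\', 'E', 'p', 's', 'i', 'l', 'o', 'n'], ['E', 'p', 's', 'i', 'l', 'o', 'n']),
  (['\\', 'Z', 'e', 't', 'a'], ['Z', 'e', 't', 'a']),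
  (['\\', 'E', 't', 'a'], ['E', 't', 'a']),
  (['\\', 'T', 'h', 'e', 't', 'a'], ['T', 'h', 'e', 't', 'a']),
  (['\\', 'I', 'o', 't', 'a'], ['I', 'o', 't', 'a']),
  (['\\', 'K', 'a', 'p', 'p', 'a'], ['K', 'a', 'p', 'p', 'a']),
  (['\\', 'L', 'a', 'm', 'b', 'd', 'a'], ['L', 'a', 'm', 'b', 'd', 'a']),
  (['\\', 'M', 'u'], ['M', 'u']),
  (['\\', 'N', 'u'], ['N', 'u']),
  (['\\', 'X', 'i'], ['X', 'i']),
  (['\\', 'P', 'i'], ['P', 'i']),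
  (['\\', 'R', 'h', 'o'], ['R', 'h', 'o']),
  (['\\', 'S', 'i', 'g', 'm', 'a'], ['S', 'i', 'g', 'm', 'a']),
  (['\\', 'T', 'a', 'u'], ['T', 'a', 'u']),
  (['\\', 'U', 'p', 's', 'i', 'l', 'o', 'n'], ['U', 'p', 's', 'i', 'l', 'o', 'n']),
  (['\\', 'P', 'h', 'i'], ['P', 'h', 'i']),
  (['\\', 'C', 'h', 'i'], ['C', 'h', 'i']),
  (['\\', 'P', 's', 'i'], ['P', 's', 'i']),
  (['\\', 'O', 'm', 'e', 'g', 'a'], ['O', 'm', 'e', 'g', 'a'])]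

-- str.replace with a nonempty pattern, written as the structural recursion the proofs below
-- (and the termination argument of pvCollapse) use; pvReplace_eq identifies it with PySem's.
def pvRepF (old new : List Char) (l : List Char) : List Char :=
  if h : old ≠ [] ∧ old.isPrefixOf l = true then new ++ pvRepF old new (l.drop old.length)
  else
    match l with
    | [] => []
    | c :: t => c :: pvRepF old new t
termination_by l.length
decreasing_by
  · have hp : old <+: l := List.isPrefixOf_iff_prefix.mp h.2
    have h1 : 0 < old.length := List.length_pos_iff.mpr h.1
    have h2 : old.length ≤ l.length := hp.length_le
    simp only [List.length_drop]; omega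
  · simp


theorem pvGo_eq (old new : List Char) (h : old ≠ []) :
    ∀ (fuel : Nat) (l acc : List Char), l.length ≤ fuel →
      PySem.Chars.replace.go old new fuel l acc = acc.reverse ++ pvRepF old new l := by
  intro fuel
  induction fuel with
  | zero =>
    intro l acc hl
    have : l = [] := List.length_eq_zero_iff.mp (Nat.le_zero.mp hl)
    subst this
    rw [pvRepF]
    simp [PySem.Chars.replace.go, h]
  | succ n ih =>
    intro l acc hl
    cases l with
    | nil => rw [pvRepF]; simp [PySem.Chars.replace.go, h]
    | cons c t =>
      rw [PySem.Chars.replace.go]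
      by_cases hp : old.isPrefixOf (c :: t) = true
      · have h1 : 0 < old.length := List.length_pos_iff.mpr h
        have hl' : t.length + 1 ≤ n + 1 := by simpa using hl
        rw [if_pos hp, ih _ _ (by simp only [List.length_drop]; simp; omega)]
        conv_rhs => rw [pvRepF]
        rw [dif_pos ⟨h, hp⟩]
        simp
      · have hl' : t.length + 1 ≤ n + 1 := by simpa using hl
        rw [if_neg hp, ih _ _ (by omega)]
        conv_rhs => rw [pvRepF]
        rw [dif_neg (by simp [hp])]
        simp


theorem pvReplace_eq (old new s : List Char) (h : old ≠ []) :
    PySem.Chars.replace s old new = pvRepF old new s := by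
  unfold PySem.Chars.replace
  rw [if_neg (by simp [List.isEmpty_iff, h])]
  simpa using pvGo_eq old new h s.length s [] le_rfl


theorem pvRepF_len_le (old new : List Char) (hn : new.length ≤ old.length) :
    ∀ l, (pvRepF old new l).length ≤ l.length := by
  intro l
  fun_induction pvRepF old new l with
  | case1 l h ih =>
    have h1 : 0 < old.length := List.length_pos_iff.mpr h.1
    have h2 : old.length ≤ l.length := (List.isPrefixOf_iff_prefix.mp h.2).length_le
    simp only [List.length_append, List.length_drop] at ih ⊢
    omega
  | case2 => simp
  | case3 h c t ih => simp at ih ⊢; omega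


theorem pvRepF_len_lt' (old new : List Char) (hn : new.length < old.length) :
    ∀ l, old <:+: l → (pvRepF old new l).length < l.length := by
  intro l
  fun_induction pvRepF old new l with
  | case1 l h ih =>
    intro _
    have h1 : 0 < old.length := List.length_pos_iff.mpr h.1
    have h2 : old.length ≤ l.length := (List.isPrefixOf_iff_prefix.mp h.2).length_le
    have := pvRepF_len_le old new (le_of_lt hn) (l.drop old.length)
    simp only [List.length_append, List.length_drop] at this ⊢
    omega
  | case2 h =>
    intro hin
    have h0 : old = [] := List.eq_nil_of_infix_nil hin
    simp [h0] at hn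
  | case3 c t h ih =>
    intro hin
    have hnotpre : ¬ old <+: (c :: t) := by
      intro hp
      by_cases ho : old = []
      · simp [ho] at hn
      · exact h ⟨ho, List.isPrefixOf_iff_prefix.mpr hp⟩
    have : old <:+: t := by
      rcases hin with ⟨p, s, hps⟩
      cases p with
      | nil => exact absurd ⟨s, by simpa using hps⟩ hnotpre
      | cons x xs =>
        exact ⟨xs, s, by simpa using congrArg List.tail hps⟩
    simpa using Nat.succ_lt_succ (ih this)


theorem pvRepF_len_lt (s : List Char) (h : PySem.Chars.isIn ['_', '_'] s = true) :
    (pvRepF ['_', '_'] ['_'] s).length < s.length :=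
  pvRepF_len_lt' ['_', '_'] ['_'] (by simp) s ((PySem.Chars.isIn_iff_infix _ _).mp h)


def pvCollapse (s : List Char) : List Char :=
  if h : PySem.Chars.isIn ['_', '_'] s = true then
    pvCollapse (PySem.Chars.replace s ['_', '_'] ['_'])
  else s
termination_by s.length
decreasing_by
  rw [pvReplace_eq _ _ _ (by simp)]
  exact pvRepF_len_lt s h

def normalize_symbol_name_py (name : String) : String :=
  if name = "" then name
  else
    let r0 := PySem.Chars.strip name.toList
    let r1 := pvGreek.foldl (fun r p => PySem.Chars.replace r p.1 p.2) r0
    let r2 := PySem.Chars.replace r1 [','] ['_']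
    let r3 := PySem.Chars.replace r2 ['{'] []
    let r4 := PySem.Chars.replace r3 ['}'] []
    let r5 := PySem.Chars.replace r4 ['\\'] []
    String.mk (pvCollapse r5)

-- ===== PORT B =====
-- one step of Source B's loop: skip '{'/'}'/'\\', map ',' to '_', drop a '_' after an emitted '_'
def pvStep (out : List Char) (ch : Char) : List Char :=
  if ch = '{' ∨ ch = '}' ∨ ch = '\\' then out
  else
    let c := if ch = ',' then '_' else ch
    if c = '_' ∧ out ≠ [] ∧ PySem.List.pyGet? out (-1) = some '_' then out
    else out ++ [c]

def normalize_symbol_name_py_alt (name : String) : String :=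
  if name = "" then name
  else String.mk ((PySem.Chars.strip name.toList).foldl pvStep [])

-- ===== PRECONDITION & SPEC =====
def Spec_normalize_symbol_name_py (name : String) (out : String) : Prop := out = normalize_symbol_name_py_alt name
instance (name : String) (out : String) : Decidable (Spec_normalize_symbol_name_py name out) := by unfold Spec_normalize_symbol_name_py; infer_instance

-- ===== CLAIM (what is proved, stated in full; the proofs are below) =====
def Claim_equal_normalize_symbol_name_py : Prop := ∀ (name : String), Dom_normalize_symbol_name_py name → Spec_normalize_symbol_name_py name (normalize_symbol_name_py name)

-- ===== LEMMAS AND PROOFS =====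

-- character-wise effect of the ','/'{'/'}'/'\\' replace passes
def pvDc (c : Char) : List Char :=
  if c = '\\' ∨ c = '{' ∨ c = '}' then [] else if c = ',' then ['_'] else [c]


def pvD (l : List Char) : List Char := l.flatMap pvDc


def pvSq (prev : Bool) : List Char → List Char
  | [] => []
  | c :: t =>
    if c = '_' then (if prev then pvSq true t else '_' :: pvSq true t)
    else c :: pvSq false t


def pvScan (prev : Bool) : List Char → List Char
  | [] => []
  | ch :: t =>
    if ch = '{' ∨ ch = '}' ∨ ch = '\\' then pvScan prev t
    else
      let c := if ch = ',' then '_' else ch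
      if c = '_' ∧ prev = true then pvScan prev t
      else c :: pvScan (c == '_') t


theorem pvRepF_single (c : Char) (r : List Char) :
    ∀ l, pvRepF [c] r l = l.flatMap (fun x => if x = c then r else [x]) := by
  intro l
  fun_induction pvRepF [c] r l with
  | case1 l h ih =>
    have hp : [c] <+: l := List.isPrefixOf_iff_prefix.mp h.2
    rcases hp with ⟨t, rfl⟩
    simp at ih ⊢
    simp [ih]
  | case2 => simp
  | case3 x t h ih =>
    have hx : ¬ x = c := by
      intro hxc
      exact h ⟨by simp, List.isPrefixOf_iff_prefix.mpr ⟨t, by simp [hxc]⟩⟩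
    simp [ih, hx]


theorem pvD_repF (old new : List Char) (h : old ≠ []) (hd : pvD new = pvD old) :
    ∀ l, pvD (pvRepF old new l) = pvD l := by
  intro l
  fun_induction pvRepF old new l with
  | case1 l hc ih =>
    rcases List.isPrefixOf_iff_prefix.mp hc.2 with ⟨t, rfl⟩
    simp only [List.drop_left] at ih ⊢
    simp only [pvD, List.flatMap_append] at ih hd ⊢
    rw [ih, hd]
  | case2 => rfl
  | case3 x t hc ih =>
    simp only [pvD, List.flatMap_cons] at ih ⊢
    rw [ih]


theorem pvD_greekfold (L : List (List Char × List Char))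
    (hL : ∀ p ∈ L, p.1 ≠ [] ∧ pvD p.2 = pvD p.1) :
    ∀ s, pvD (L.foldl (fun r p => PySem.Chars.replace r p.1 p.2) s) = pvD s := by
  induction L with
  | nil => intro s; rfl
  | cons p L ih =>
    intro s
    have hp := hL p (by simp)
    rw [List.foldl_cons, ih (fun q hq => hL q (by simp [hq])),
        pvReplace_eq _ _ _ hp.1, pvD_repF _ _ hp.1 hp.2]


theorem pvPipeTail_eq (s : List Char) :
    PySem.Chars.replace (PySem.Chars.replace (PySem.Chars.replace
      (PySem.Chars.replace s [','] ['_']) ['{'] []) ['}'] []) ['\\'] [] = pvD s := by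
  rw [pvReplace_eq _ _ _ (by simp), pvReplace_eq _ _ _ (by simp),
      pvReplace_eq _ _ _ (by simp), pvReplace_eq _ _ _ (by simp),
      pvRepF_single, pvRepF_single, pvRepF_single, pvRepF_single]
  induction s with
  | nil => rfl
  | cons c t ih =>
    simp only [List.flatMap_cons, List.flatMap_append, pvD] at ih ⊢
    rw [ih]
    congr 1
    by_cases h1 : c = ','
    · simp [h1, pvDc]
    · by_cases h2 : c = '{'
      · simp [h2, pvDc]
      · by_cases h3 : c = '}'
        · simp [h3, pvDc]
        · by_cases h4 : c = '\\'
          · simp [h4, pvDc]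
          · simp [h1, h2, h3, h4, pvDc]


theorem pvSq_repF (l : List Char) : ∀ prev, pvSq prev (pvRepF ['_', '_'] ['_'] l) = pvSq prev l := by
  fun_induction pvRepF ['_', '_'] ['_'] l with
  | case1 l hc ih =>
    intro prev
    rcases List.isPrefixOf_iff_prefix.mp hc.2 with ⟨t, rfl⟩
    simp only [List.drop_left] at ih ⊢
    cases prev <;> simp [pvSq, ih]
  | case2 => intro prev; rfl
  | case3 c t hc ih =>
    intro prev
    by_cases hcu : c = '_'
    · subst hcu
      have ht : t.head? ≠ some '_' := by
        intro hh
        cases t with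
        | nil => simp at hh
        | cons x xs =>
          simp at hh
          exact hc ⟨by simp, List.isPrefixOf_iff_prefix.mpr ⟨xs, by simp [hh]⟩⟩
      cases t with
      | nil => cases prev <;> simp [pvSq, pvRepF]
      | cons x xs =>
        have hx : ¬ x = '_' := fun hxx => ht (by simp [hxx])
        cases prev <;> simp [pvSq, ih, hx]
    · cases prev <;> simp [pvSq, ih, hcu]


theorem pvSq_id (l : List Char) : ∀ prev, ¬ (['_', '_'] <:+: l) →
    (prev = true → l.head? ≠ some '_') → pvSq prev l = l := by
  induction l with
  | nil => intro prev _ _; rfl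
  | cons c t ih =>
    intro prev hinf hh
    have hti : ¬ (['_', '_'] <:+: t) := fun h => hinf (h.trans (List.suffix_cons c t).isInfix)
    by_cases hcu : c = '_'
    · subst hcu
      have hth : t.head? ≠ some '_' := by
        intro h
        cases t with
        | nil => simp at h
        | cons x xs =>
          simp at h
          exact hinf ⟨[], xs, by simp [h]⟩
      have hp : prev ≠ true := fun hp => hh hp (by simp)
      simp only [Bool.not_eq_true] at hp
      simp [pvSq, hp, ih true hti (fun _ => hth)]
    · simp [pvSq, hcu, ih false hti (by simp)]


theorem pvCollapse_eq (s : List Char) : pvCollapse s = pvSq false s := by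
  fun_induction pvCollapse s with
  | case1 s h ih =>
    rw [ih, pvReplace_eq _ _ _ (by simp), pvSq_repF]
  | case2 s h =>
    have : ¬ (['_', '_'] <:+: s) := by
      intro hi
      exact h ((PySem.Chars.isIn_iff_infix _ _).mpr hi)
    exact (pvSq_id s false this (by simp)).symm


theorem pvFoldl_scan (l : List Char) :
    ∀ out, l.foldl pvStep out = out ++ pvScan (decide (out.getLast? = some '_')) l := by
  induction l with
  | nil => intro out; simp [pvScan]
  | cons ch t ih =>
    intro out
    rw [List.foldl_cons]
    by_cases hs : ch = '{' ∨ ch = '}' ∨ ch = '\\'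
    · rw [show pvStep out ch = out by simp [pvStep, hs]]
      rw [ih]
      conv_rhs => rw [pvScan]
      rw [if_pos hs]
    · set c := if ch = ',' then '_' else ch with hc
      by_cases hsup : c = '_' ∧ out ≠ [] ∧ PySem.List.pyGet? out (-1) = some '_'
      · have hprev : (decide (out.getLast? = some '_')) = true := by
          rw [decide_eq_true_iff]
          simpa [PySem.List.pyGet?_neg_one] using hsup.2.2
        rw [show pvStep out ch = out by rw [pvStep, if_neg hs]; simp only [← hc]; rw [if_pos hsup]]
        rw [ih]
        conv_rhs => rw [pvScan]
        rw [if_neg hs]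
        simp only [← hc]
        rw [hprev]
        simp [hsup.1]
      · rw [show pvStep out ch = out ++ [c] by rw [pvStep, if_neg hs]; simp only [← hc]; rw [if_neg hsup]]
        rw [ih]
        conv_rhs => rw [pvScan]
        rw [if_neg hs]
        simp only [← hc]
        have hcond : ¬ (c = '_' ∧ (decide (out.getLast? = some '_')) = true) := by
          intro ⟨h1, h2⟩
          rw [decide_eq_true_iff] at h2
          apply hsup
          refine ⟨h1, ?_, ?_⟩
          · intro ho; simp [ho] at h2
          · simpa [PySem.List.pyGet?_neg_one] using h2
        rw [if_neg hcond]
        by_cases h1 : c = '_'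
        · simp [h1]
        · rw [beq_false_of_ne h1]
          simp [h1]


theorem pvScan_eq (l : List Char) : ∀ prev, pvScan prev l = pvSq prev (pvD l) := by
  induction l with
  | nil => intro prev; rfl
  | cons ch t ih =>
    intro prev
    have hflat : pvD (ch :: t) = pvDc ch ++ pvD t := by simp [pvD]
    by_cases hs : ch = '{' ∨ ch = '}' ∨ ch = '\\'
    · have hd : pvDc ch = [] := by rcases hs with h | h | h <;> simp [pvDc, h]
      rw [pvScan, if_pos hs, hflat, hd, List.nil_append]
      exact ih prev
    · have hs' : ¬ (ch = '{' ∨ ch = '}' ∨ ch = '\\') := hs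
      push_neg at hs
      by_cases hcm : ch = ','
      · have hd : pvDc ch = ['_'] := by simp [pvDc, hcm, hs.1, hs.2.1, hs.2.2]
        rw [hflat, hd]
        subst hcm
        cases prev <;> simp [pvScan, pvSq, ih]
      · have hd : pvDc ch = [ch] := by simp [pvDc, hcm, hs.1, hs.2.1, hs.2.2]
        rw [hflat, hd]
        by_cases hu : ch = '_'
        · subst hu
          cases prev <;> simp [pvScan, pvSq, ih]
        · cases prev <;>
            simp [pvScan, pvSq, ih, hs.1, hs.2.1, hs.2.2, hcm, hu, beq_false_of_ne hu]

theorem pvGreek_ok : ∀ p ∈ pvGreek, p.1 ≠ [] ∧ pvD p.2 = pvD p.1 := by decide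

-- ===== VERDICT (by name: the statement is the Claim_ definition above) =====
theorem normalize_symbol_name_py_spec : Claim_equal_normalize_symbol_name_py := by
  intro name _
  unfold Spec_normalize_symbol_name_py normalize_symbol_name_py normalize_symbol_name_py_alt
  by_cases hn : name = ""
  · simp [hn]
  · simp only [if_neg hn]
    rw [pvPipeTail_eq, pvD_greekfold pvGreek pvGreek_ok, pvCollapse_eq,
        pvFoldl_scan, ← pvScan_eq]
    simp
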